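-- pv_equiv track=rewrite | github.com/ndhanushkodi/DSA-17-Dev | day01/pset_soln.py | circularly_sorted
-- ===== SOURCE A (Python) =====
-- def circularly_sorted(arr):
--     if len(arr) == 0:
--         return -1
--     descends = 0
--     index = 0
--     for i in range(1, len(arr)):
--         if arr[i] < arr[i-1]:
--             descends+=1
--             index=i
--         if (descends > 1) or (descends > 0 and arr[i] > arr[0]):
--             return -1
--     return index
-- ===== SOURCE B (Python) =====
-- def circularly_sorted(arr):
--     drops = [i for i in range(1, len(arr)) if arr[i] < arr[i - 1]]
--     if not arr:
--         return -1
--     if len(drops) > 1: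
--         return -1
--     if drops:
--         p = drops[0]
--         if any(arr[i] > arr[0] for i in range(p, len(arr))):
--             return -1
--         return p
--     return 0
-- ===== Notes on version B (the rewrite author's own statement) =====
-- stated objective: alternative
-- what changed: Replaces A's single fused scan with a mutable descend counter and early returns by a two-pass structure: first build the table of descent indices, then validate the suffix after the unique descent against the first element.
import Mathlib
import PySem

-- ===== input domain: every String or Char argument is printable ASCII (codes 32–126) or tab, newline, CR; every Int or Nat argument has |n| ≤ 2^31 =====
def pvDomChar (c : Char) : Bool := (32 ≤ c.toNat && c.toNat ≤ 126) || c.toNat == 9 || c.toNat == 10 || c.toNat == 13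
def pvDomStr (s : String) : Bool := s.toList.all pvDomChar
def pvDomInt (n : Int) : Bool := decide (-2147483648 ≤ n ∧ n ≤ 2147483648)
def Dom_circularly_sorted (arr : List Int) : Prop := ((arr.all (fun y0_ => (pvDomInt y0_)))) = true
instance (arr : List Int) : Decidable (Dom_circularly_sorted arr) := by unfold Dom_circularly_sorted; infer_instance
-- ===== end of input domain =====

-- B restructures A's single fused scan (mutable descend counter + early returns) into a
-- two-pass form: build the list of descent indices, then validate; same O(n) cost.
-- All list indices below are produced by ranges inside [0, arr.length), so getD is exact.

-- ===== PORT A =====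
-- the for-loop of A: state = (descends, index), early return -1 modelled by returning -1
def circularly_sorted_go (arr : List Int) : List Nat → Int → Int → Int
  | [], _, index => index
  | i :: rest, descends, index =>
    let s : Int × Int :=
      if arr.getD i 0 < arr.getD (i - 1) 0 then (descends + 1, (i : Int)) else (descends, index)
    if s.1 > 1 ∨ (s.1 > 0 ∧ arr.getD i 0 > arr.getD 0 0) then -1
    else circularly_sorted_go arr rest s.1 s.2

def circularly_sorted (arr : List Int) : Int :=
  if arr.length = 0 then -1
  else circularly_sorted_go arr (List.range' 1 (arr.length - 1)) 0 0

-- ===== PORT B =====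
def circularly_sorted_alt (arr : List Int) : Int :=
  let drops :=
    (List.range' 1 (arr.length - 1)).filter
      (fun i => decide (arr.getD i 0 < arr.getD (i - 1) 0))
  if arr.isEmpty then -1
  else if drops.length > 1 then -1
  else
    match drops with
    | p :: _ =>
      if (List.range' p (arr.length - p)).any
          (fun i => decide (arr.getD i 0 > arr.getD 0 0)) then -1
      else (p : Int)
    | [] => 0

-- ===== PRECONDITION & SPEC =====
def Spec_circularly_sorted (arr : List Int) (out : Int) : Prop := out = circularly_sorted_alt arr
instance (arr : List Int) (out : Int) : Decidable (Spec_circularly_sorted arr out) := by unfold Spec_circularly_sorted; infer_instance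

-- ===== CLAIM (what is proved, stated in full; the proofs are below) =====
def Claim_equal_circularly_sorted : Prop := ∀ (arr : List Int), Dom_circularly_sorted arr → Spec_circularly_sorted arr (circularly_sorted arr)

-- ===== LEMMAS AND PROOFS =====

-- an any-of-disjunction over a list whose left disjunct is everywhere false
theorem any_or_drop_false (P Q : Nat → Bool) (l : List Nat) (h : ∀ i ∈ l, P i = false) :
    (l.any fun i => P i || Q i) = l.any Q := by
  induction l with
  | nil => rfl
  | cons a t ih => simp [h a (by simp), ih (fun i hi => h i (by simp [hi]))]

-- A's loop in the 'one descent already seen' phase returns -1 iff a second descent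
-- or an element above arr[0] shows up, else the recorded index p.
theorem go_one (arr : List Int) (L : List Nat) (p : Int) :
    circularly_sorted_go arr L 1 p =
      if L.any (fun i => decide (arr.getD i 0 < arr.getD (i - 1) 0) ||
                         decide (arr.getD i 0 > arr.getD 0 0)) then -1 else p := by
  induction L with
  | nil => simp [circularly_sorted_go]
  | cons i rest ih =>
    by_cases hd : arr.getD i 0 < arr.getD (i - 1) 0
    · have hd' := hd; simp only [List.getD_eq_getElem?_getD] at hd'
      simp only [circularly_sorted_go, if_pos hd, List.any_cons]
      norm_num [hd']
    · have hd' := hd; simp only [List.getD_eq_getElem?_getD] at hd'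
      by_cases hg : arr.getD i 0 > arr.getD 0 0
      · have hg' := hg; simp only [List.getD_eq_getElem?_getD] at hg'
        simp only [circularly_sorted_go, if_neg hd, List.any_cons]
        norm_num [hd', hg']
      · have hg' := hg; simp only [List.getD_eq_getElem?_getD] at hg'
        simp only [circularly_sorted_go, if_neg hd, List.any_cons]
        norm_num [hd', hg', ih]

-- A descent-free prefix leaves A's loop state (0, idx) untouched.
theorem go_zero_prefix (arr : List Int) (L R : List Nat) (idx : Int)
    (h : ∀ i ∈ L, ¬ arr.getD i 0 < arr.getD (i - 1) 0) :
    circularly_sorted_go arr (L ++ R) 0 idx = circularly_sorted_go arr R 0 idx := by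
  induction L with
  | nil => simp
  | cons i rest ih =>
    have hi : ¬ arr.getD i 0 < arr.getD (i - 1) 0 := h i (by simp)
    simp only [List.cons_append, circularly_sorted_go, hi, if_false]
    simpa using ih (fun j hj => h j (by simp [hj]))

-- the suffix of a range after one of its elements is again a range
theorem range'_suffix (s m : Nat) (l1 l2 : List Nat) (a : Nat)
    (h : List.range' s m = l1 ++ a :: l2) :
    a = s + l1.length ∧ l2 = List.range' (a + 1) (m - l1.length - 1) := by
  induction m generalizing s l1 with
  | zero => simp at h
  | succ m ih =>
    rw [List.range'_succ] at h
    cases l1 with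
    | nil =>
      simp at h
      obtain ⟨ha, hl⟩ := h
      exact ⟨by simp [← ha], by simpa [← ha] using hl.symm⟩
    | cons b l1' =>
      simp at h
      obtain ⟨hb, hl⟩ := h
      obtain ⟨h1, h2⟩ := ih (s + 1) l1' hl
      have hlen : l1'.length + 1 ≤ m := by
        have := congrArg List.length hl
        simp at this; omega
      constructor
      · simp only [List.length_cons]; omega
      · rw [h2]; congr 1; simp only [List.length_cons]; omega

theorem mem_drops_lt (arr : List Int) (p : Nat)
    (hp : p ∈ (List.range' 1 (arr.length - 1)).filter
        (fun i => decide (arr.getD i 0 < arr.getD (i - 1) 0))) :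
    1 ≤ p ∧ p < arr.length := by
  have := List.mem_of_mem_filter hp
  rw [List.mem_range'] at this
  omega

-- ===== VERDICT (by name: the statement is the Claim_ definition above) =====
theorem circularly_sorted_spec : Claim_equal_circularly_sorted := by
  intro arr _
  unfold Spec_circularly_sorted circularly_sorted circularly_sorted_alt
  by_cases hemp : arr.length = 0
  · have : arr = [] := List.length_eq_zero_iff.mp hemp
    simp [this]
  · simp only [hemp, if_false, List.isEmpty_iff_length_eq_zero]
    set dropP : Nat → Bool := fun i => decide (arr.getD i 0 < arr.getD (i - 1) 0) with hdropP
    rcases hds : (List.range' 1 (arr.length - 1)).filter dropP with _ | ⟨p, rest⟩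
    · -- no descents: A's loop keeps (0,0)
      have hA : circularly_sorted_go arr (List.range' 1 (arr.length - 1)) 0 0 = 0 := by
        have := go_zero_prefix arr (List.range' 1 (arr.length - 1)) [] 0
          (fun i hi => by
            have : dropP i = false := by
              by_contra hcon
              have : i ∈ (List.range' 1 (arr.length - 1)).filter dropP :=
                List.mem_filter.mpr ⟨hi, by simpa using hcon⟩
              simp [hds] at this
            simpa [hdropP] using this)
        simpa [circularly_sorted_go] using this
      simp [hA]
    · -- at least one descent at p
      obtain ⟨l1, l2, hsplit, hl1, hpdrop, hl2⟩ := List.filter_eq_cons_iff.mp hds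
      have hl1len : p = 1 + l1.length := (range'_suffix _ _ _ _ _ hsplit).1
      have hl2range : l2 = List.range' (p + 1) ((arr.length - 1) - l1.length - 1) :=
        (range'_suffix _ _ _ _ _ hsplit).2
      have hpd : arr.getD p 0 < arr.getD (p - 1) 0 := by simpa [hdropP] using hpdrop
      have hp1 : 1 ≤ p ∧ p < arr.length := mem_drops_lt arr p (by rw [hds]; simp)
      -- A runs: skip l1, take the descent at p, then phase-one on l2
      have hA : circularly_sorted_go arr (List.range' 1 (arr.length - 1)) 0 0 =
          if arr.getD p 0 > arr.getD 0 0 then -1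
          else if l2.any (fun i => dropP i || decide (arr.getD i 0 > arr.getD 0 0))
               then -1 else (p : Int) := by
        rw [hsplit, go_zero_prefix arr l1 (p :: l2) 0
          (fun i hi => by
            have := hl1 i hi
            simpa [hdropP] using this)]
        have hpd' := hpd; simp only [List.getD_eq_getElem?_getD] at hpd'
        by_cases hg : arr.getD p 0 > arr.getD 0 0
        · have hg' := hg; simp only [List.getD_eq_getElem?_getD] at hg'
          simp [circularly_sorted_go, hpd', hg']
        · have hg' := hg; simp only [List.getD_eq_getElem?_getD] at hg'
          simp [circularly_sorted_go, hpd', hg', go_one, hdropP]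
      rw [hA]
      cases rest with
      | cons q rest' =>
        -- a second descent exists in l2: both sides are -1
        have hq : q ∈ l2 := List.mem_of_mem_filter (by rw [hl2]; simp)
        have hqd : dropP q = true := by
          have : q ∈ l2.filter dropP := by rw [hl2]; simp
          exact (List.mem_filter.mp this).2
        have hany : l2.any (fun i => dropP i || decide (arr.getD i 0 > arr.getD 0 0)) = true :=
          List.any_eq_true.mpr ⟨q, hq, by simp [hqd]⟩
        rw [if_pos (show (p :: q :: rest').length > 1 by simp)]
        by_cases hg : arr.getD p 0 > arr.getD 0 0
        · rw [if_pos hg]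
        · rw [if_neg hg, if_pos hany]
      | nil =>
        -- exactly one descent: compare phase-one scan against B's range [p, n)
        have hl2nodrop : ∀ i ∈ l2, dropP i = false := by
          intro i hi
          by_contra hcon
          have : i ∈ l2.filter dropP := List.mem_filter.mpr ⟨hi, by simpa using hcon⟩
          simp [hl2] at this
        have hrange : List.range' p (arr.length - p) =
            p :: List.range' (p + 1) ((arr.length - 1) - l1.length - 1) := by
          have h1 : arr.length - p = ((arr.length - 1) - l1.length - 1) + 1 := by omega
          rw [h1, List.range'_succ]
        have hanyeq : l2.any (fun i => dropP i || decide (arr.getD i 0 > arr.getD 0 0)) =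
            l2.any (fun i => decide (arr.getD i 0 > arr.getD 0 0)) :=
          any_or_drop_false dropP _ l2 hl2nodrop
        rw [if_neg (show ¬(([p] : List Nat).length > 1) by simp)]
        show _ = if ((List.range' p (arr.length - p)).any
            fun i => decide (arr.getD i 0 > arr.getD 0 0)) = true then -1 else ((p : Nat) : Int)
        rw [hrange, ← hl2range, List.any_cons, hanyeq]
        by_cases hg : arr.getD p 0 > arr.getD 0 0
        · rw [if_pos hg, if_pos (Bool.or_eq_true _ _ ▸ Or.inl (decide_eq_true hg) : _)]
        · rw [if_neg hg]
          by_cases h2 : l2.any (fun i => decide (arr.getD i 0 > arr.getD 0 0)) = true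
          · rw [if_pos h2, if_pos (Bool.or_eq_true _ _ ▸ Or.inr h2 : _)]
          · rw [if_neg h2, if_neg (fun hc => by
              rcases (Bool.or_eq_true _ _).mp hc with h | h
              · exact hg (of_decide_eq_true h)
              · exact h2 h)]
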